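-- pv_equiv track=rewrite | github.com/mkvenkatesh/Random-Programming-Exercises | People_Birth_Death_Highest_Population.py | calculate_running_total_max
-- ===== SOURCE A (Python) =====
-- def calculate_running_total_max(delta_array, min_birth):
--     running_sum = 0
--     max_year = 0
--     max_population = 0
--     for year_idx, year_count in enumerate(delta_array): # O(Y)
--         running_sum = running_sum + year_count
--         if (running_sum > max_population):
--             max_population = running_sum
--             max_year = year_idx + min_birth
--     return (max_year, max_population)
-- ===== SOURCE B (Python) =====
-- def calculate_running_total_max(delta_array, min_birth):
--     # Two-pass decomposition: build the prefix-sum table, then take the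
--     # (first) argmax with the builtin max; non-positive best -> (0, 0).
--     prefixes = []
--     total = 0
--     for d in delta_array:
--         total += d
--         prefixes.append(total)
--     best = max(enumerate(prefixes), key=lambda p: p[1], default=None)
--     if best is None or best[1] <= 0:
--         return (0, 0)
--     return (best[0] + min_birth, best[1])
-- ===== Notes on version B (the rewrite author's own statement) =====
-- stated objective: alternative
-- what changed: Replaces the fused running-sum/argmax loop with a prefix-sum table pass followed by a separate builtin max(enumerate(...)) argmax pass and a positivity guard.
import Mathlib
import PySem

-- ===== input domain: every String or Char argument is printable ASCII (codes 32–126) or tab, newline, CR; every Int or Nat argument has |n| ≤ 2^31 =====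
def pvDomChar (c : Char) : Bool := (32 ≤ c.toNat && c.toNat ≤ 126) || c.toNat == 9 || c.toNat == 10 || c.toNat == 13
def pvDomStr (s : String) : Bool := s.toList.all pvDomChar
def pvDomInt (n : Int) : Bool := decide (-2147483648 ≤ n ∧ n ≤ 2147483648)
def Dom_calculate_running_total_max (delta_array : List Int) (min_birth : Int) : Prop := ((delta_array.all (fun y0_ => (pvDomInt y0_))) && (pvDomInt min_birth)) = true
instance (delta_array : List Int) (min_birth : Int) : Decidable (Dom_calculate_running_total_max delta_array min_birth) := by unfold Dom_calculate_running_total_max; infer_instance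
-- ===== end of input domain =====

-- B replaces A's fused running-sum/argmax loop with a two-pass decomposition
-- (prefix-sum table, then first-argmax via max over the enumerated table); alternative, not faster.


-- ===== PORT A =====
def calculate_running_total_max (delta_array : List Int) (min_birth : Int) : Int × Int :=
  let s := (PySem.List.enumerate delta_array).foldl
    (fun (st : Int × Int × Int) (p : Int × Int) =>
      let running_sum := st.1 + p.2
      if running_sum > st.2.2 then (running_sum, p.1 + min_birth, running_sum)
      else (running_sum, st.2.1, st.2.2))
    (0, 0, 0)
  (s.2.1, s.2.2)

-- ===== PORT B =====
def calculate_running_total_max_alt (delta_array : List Int) (min_birth : Int) : Int × Int :=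
  let prefixes := (delta_array.foldl
    (fun (acc : Int × List Int) d => (acc.1 + d, acc.2 ++ [acc.1 + d]))
    (0, ([] : List Int))).2
  match PySem.List.max? (PySem.List.enumerate prefixes) (fun p => p.2) with
  | none => (0, 0)
  | some best => if best.2 ≤ 0 then (0, 0) else (best.1 + min_birth, best.2)

-- ===== PRECONDITION & SPEC =====
def Spec_calculate_running_total_max (delta_array : List Int) (min_birth : Int) (out : Int × Int) : Prop := out = calculate_running_total_max_alt delta_array min_birth
instance (delta_array : List Int) (min_birth : Int) (out : Int × Int) : Decidable (Spec_calculate_running_total_max delta_array min_birth out) := by unfold Spec_calculate_running_total_max; infer_instance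

-- ===== CLAIM (what is proved, stated in full; the proofs are below) =====
def Claim_equal_calculate_running_total_max : Prop := ∀ (delta_array : List Int) (min_birth : Int), Dom_calculate_running_total_max delta_array min_birth → Spec_calculate_running_total_max delta_array min_birth (calculate_running_total_max delta_array min_birth)

-- ===== LEMMAS AND PROOFS =====

-- prefix sums of l starting from running total rs
def pvAccumFrom : Int → List Int → List Int
  | _, [] => []
  | rs, d :: t => (rs + d) :: pvAccumFrom (rs + d) t

-- the argmax step A's loop performs on the (index, prefix-sum) stream
def pvGStep (mb : Int) (b : Int × Int) (p : Int × Int) : Int × Int :=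
  if p.2 > b.2 then (p.1 + mb, p.2) else b

-- how A's (max_year, max_population) pair is read off the running first-max state
def pvConv (mb : Int) : Option (Int × Int) → Int × Int
  | none => (0, 0)
  | some (i, v) => if 0 < v then (i + mb, v) else (0, 0)

theorem pvBuild_eq (l : List Int) (t : Int) (pre : List Int) :
    l.foldl (fun (acc : Int × List Int) d => (acc.1 + d, acc.2 ++ [acc.1 + d])) (t, pre)
      = (t + l.sum, pre ++ pvAccumFrom t l) := by
  induction l generalizing t pre with
  | nil => simp [pvAccumFrom]
  | cons d tl ih =>
      simp only [List.foldl_cons, pvAccumFrom, ih]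
      simp only [List.sum_cons, List.append_assoc, List.singleton_append, Prod.mk.injEq]
      exact ⟨by ring, trivial⟩

theorem pvAfold_eq (mb : Int) (l : List Int) (k rs my mp : Int) :
    (PySem.List.enumerate l k).foldl
      (fun (st : Int × Int × Int) (p : Int × Int) =>
        let running_sum := st.1 + p.2
        if running_sum > st.2.2 then (running_sum, p.1 + mb, running_sum)
        else (running_sum, st.2.1, st.2.2))
      (rs, my, mp)
      = (rs + l.sum, (PySem.List.enumerate (pvAccumFrom rs l) k).foldl (pvGStep mb) (my, mp)) := by
  induction l generalizing k rs my mp with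
  | nil => simp [PySem.List.enumerate, pvAccumFrom]
  | cons d tl ih =>
      simp only [PySem.List.enumerate_cons, pvAccumFrom, List.foldl_cons]
      rw [ih]
      by_cases h : rs + d > mp
      · simp [pvGStep, h]; ring
      · simp [pvGStep, h]; ring

-- the step function of PySem.List.max? with the second-component key
def pvBStep (acc : Option (Int × Int)) (x : Int × Int) : Option (Int × Int) :=
  match acc with
  | none => some x
  | some m => if m.2 < x.2 then some x else some m

theorem pvMax?_eq (l : List (Int × Int)) :
    PySem.List.max? l (fun p => p.2) = l.foldl pvBStep none := by
  unfold PySem.List.max?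
  congr 1
  funext acc x
  cases acc <;> rfl

theorem pvConv_step (mb : Int) (o : Option (Int × Int)) (p : Int × Int) :
    pvGStep mb (pvConv mb o) p = pvConv mb (pvBStep o p) := by
  cases o with
  | none => simp [pvGStep, pvConv, pvBStep]
  | some m =>
      obtain ⟨i, v⟩ := m
      by_cases hv : 0 < v <;> by_cases hx : v < p.2 <;>
        simp [pvGStep, pvConv, pvBStep, hv, hx, Prod.ext_iff] <;> intros <;> omega

theorem pvGfold_eq_conv (mb : Int) (l : List (Int × Int)) (o : Option (Int × Int)) :
    l.foldl (pvGStep mb) (pvConv mb o)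
      = pvConv mb (l.foldl pvBStep o) := by
  induction l generalizing o with
  | nil => rfl
  | cons p tl ih =>
      simp only [List.foldl_cons, pvConv_step]
      exact ih _

-- ===== VERDICT (by name: the statement is the Claim_ definition above) =====
theorem calculate_running_total_max_spec : Claim_equal_calculate_running_total_max := by
  intro delta_array min_birth _
  show _ = _
  unfold calculate_running_total_max calculate_running_total_max_alt
  rw [pvBuild_eq]
  simp only [List.nil_append]
  rw [pvAfold_eq, pvMax?_eq]
  have h := pvGfold_eq_conv min_birth
      (PySem.List.enumerate (pvAccumFrom 0 delta_array) 0) none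
  simp only [pvConv] at h
  simp only [h]
  cases hF : (PySem.List.enumerate (pvAccumFrom 0 delta_array) 0).foldl pvBStep none with
  | none => simp
  | some best =>
      obtain ⟨i, v⟩ := best
      show ((if 0 < v then (i + min_birth, v) else ((0 : Int), (0 : Int))).1,
            (if 0 < v then (i + min_birth, v) else ((0 : Int), (0 : Int))).2)
          = if v ≤ 0 then ((0 : Int), (0 : Int)) else (i + min_birth, v)
      split_ifs <;> first | rfl | omega
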